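-- pv_equiv track=rewrite | github.com/arcensia/JobCrawling | job_pool.py | pool_summary
-- ===== SOURCE A (Python) =====
-- def pool_summary(pool: dict) -> dict:
--     """open/closed + reaction 별 집계."""
--     counts = {
--         "open": 0, "closed": 0,
--         "applied": 0, "interested": 0, "rejected": 0,
--     }
--     for entry in pool.values():
--         counts[entry.get("status", "open")] += 1
--         r = entry.get("reaction")
--         if r:
--             counts[r] = counts.get(r, 0) + 1
--     return counts
-- ===== SOURCE B (Python) =====
-- def _tally(keys):
--     tab = {}
--     for k in keys:
--         tab[k] = tab.get(k, 0) + 1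
--     return tab
--
--
-- def pool_summary(pool: dict) -> dict:
--     """open/closed + reaction 별 집계."""
--     entries = list(pool.values())
--     status_tab = _tally(e.get("status", "open") for e in entries)
--     react_tab = _tally(r for e in entries if (r := e.get("reaction")))
--     counts = dict.fromkeys(("open", "closed", "applied", "interested", "rejected"), 0)
--     for tab in (status_tab, react_tab):
--         for k, v in tab.items():
--             counts[k] = counts.get(k, 0) + v
--     return counts
-- ===== Notes on version B (the rewrite author's own statement) =====
-- stated objective: alternative
-- what changed: Replaces the single combined per-entry loop with build-then-merge passes: one frequency table over statuses and one over truthy reactions are built separately, then each table is folded into the pre-initialized counts dict via counts.get(k,0)+v.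
import Mathlib
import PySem

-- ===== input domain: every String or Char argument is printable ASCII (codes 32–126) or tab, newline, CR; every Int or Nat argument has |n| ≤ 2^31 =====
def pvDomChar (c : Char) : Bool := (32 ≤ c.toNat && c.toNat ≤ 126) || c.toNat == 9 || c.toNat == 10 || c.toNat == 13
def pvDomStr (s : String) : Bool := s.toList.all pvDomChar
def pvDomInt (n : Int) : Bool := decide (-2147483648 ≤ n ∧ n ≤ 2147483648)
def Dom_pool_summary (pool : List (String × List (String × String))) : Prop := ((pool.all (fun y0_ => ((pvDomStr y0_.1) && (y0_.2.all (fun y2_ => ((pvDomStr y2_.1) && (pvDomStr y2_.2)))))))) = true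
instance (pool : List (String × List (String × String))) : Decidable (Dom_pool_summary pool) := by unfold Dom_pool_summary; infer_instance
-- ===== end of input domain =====

-- B replaces A's single combined per-entry loop with build-then-merge passes (two frequency tables,
-- one over statuses and one over truthy reactions, folded into the pre-initialized counts dict);
-- objective: alternative decomposition, same cost.

-- shared helpers: entry.get("status", "open") and entry.get("reaction")
def entryStatus (v : List (String × String)) : String :=
  (PySem.Dict.ofList v).getD "status" "open"

def entryReaction (v : List (String × String)) : Option String :=
  (PySem.Dict.ofList v).get? "reaction"

-- ===== PORT A =====
def initCounts : PySem.Dict String Int :=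
  PySem.Dict.ofList [("open", 0), ("closed", 0), ("applied", 0), ("interested", 0), ("rejected", 0)]

-- counts[entry.get("status","open")] += 1 raises KeyError in Python when the key is absent;
-- Pre_ excludes exactly those inputs, here the step is written with getD 0 (exact on Pre_).
def pool_summary (pool : List (String × List (String × String))) : List (String × Int) :=
  (((PySem.Dict.ofList pool).values).foldl (fun c v =>
      let c1 := c.insert (entryStatus v) (c.getD (entryStatus v) 0 + 1)
      match entryReaction v with
      | some r => if r = "" then c1 else c1.insert r (c1.getD r 0 + 1)
      | none => c1) initCounts).items

-- ===== PORT B =====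
-- _tally: tab = {}; for k in keys: tab[k] = tab.get(k, 0) + 1
def tally (keys : List String) : PySem.Dict String Int :=
  keys.foldl (fun d k => d.insert k (d.getD k 0 + 1)) PySem.Dict.empty

-- r := e.get("reaction") kept only when truthy
def reactTruthy (v : List (String × String)) : Option String :=
  match entryReaction v with
  | some r => if r = "" then none else some r
  | none => none

def pool_summary_alt (pool : List (String × List (String × String))) : List (String × Int) :=
  let entries := (PySem.Dict.ofList pool).values
  let status_tab := tally (entries.map entryStatus)
  let react_tab := tally (entries.filterMap reactTruthy)
  -- dict.fromkeys((...five...), 0)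
  let counts0 := (["open", "closed", "applied", "interested", "rejected"] : List String).foldl
      (fun d k => d.insert k (0 : Int)) PySem.Dict.empty
  let c1 := status_tab.items.foldl (fun c p => c.insert p.1 (c.getD p.1 0 + p.2)) counts0
  let c2 := react_tab.items.foldl (fun c p => c.insert p.1 (c.getD p.1 0 + p.2)) c1
  c2.items

-- ===== PRECONDITION & SPEC =====
-- Pre_ excludes pools in which some entry's status (defaulting to "open") is not one of the five
-- preset keys: there A either raises KeyError, or — when that status string was introduced earlier
-- as a reaction — returns a dict whose trailing key order is an artefact of interleaved insertion.
def Pre_pool_summary (pool : List (String × List (String × String))) : Prop :=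
  ∀ v ∈ (PySem.Dict.ofList pool).values,
    entryStatus v ∈ (["open", "closed", "applied", "interested", "rejected"] : List String)
instance (pool : List (String × List (String × String))) : Decidable (Pre_pool_summary pool) := by
  unfold Pre_pool_summary; infer_instance

def pvWitness_pool_summary : (List (String × List (String × String))) :=
  [("a", [("status", "open"), ("reaction", "applied")]), ("b", [("reaction", "hmm")])]

def Spec_pool_summary (pool : List (String × List (String × String))) (out : List (String × Int)) : Prop := out = pool_summary_alt pool
instance (pool : List (String × List (String × String))) (out : List (String × Int)) : Decidable (Spec_pool_summary pool out) := by unfold Spec_pool_summary; infer_instance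

-- ===== CLAIM (what is proved, stated in full; the proofs are below) =====
def Claim_equal_pool_summary : Prop := ∀ (pool : List (String × List (String × String))), Dom_pool_summary pool → Pre_pool_summary pool → Spec_pool_summary pool (pool_summary pool)

-- ===== LEMMAS AND PROOFS =====

def bump (c : PySem.Dict String Int) (k : String) : PySem.Dict String Int :=
  c.modify k 0 (· + 1)

-- reaction keys of one entry as a list
def rKeys (v : List (String × String)) : List String := (reactTruthy v).toList

-- all keys an entry bumps, in A's order
def keysOf (v : List (String × String)) : List String := entryStatus v :: rKeys v

def fiveKeys : List String := ["open", "closed", "applied", "interested", "rejected"]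

-- (1) A's loop is a bump-fold over the interleaved key list
lemma A_foldl (vs : List (List (String × String))) (c : PySem.Dict String Int) :
    vs.foldl (fun c v =>
      let c1 := c.insert (entryStatus v) (c.getD (entryStatus v) 0 + 1)
      match entryReaction v with
      | some r => if r = "" then c1 else c1.insert r (c1.getD r 0 + 1)
      | none => c1) c
    = (vs.flatMap keysOf).foldl bump c := by
  induction vs generalizing c with
  | nil => rfl
  | cons v vs ih =>
    simp only [List.foldl_cons, List.flatMap_cons, List.foldl_append, ih]
    congr 1
    simp only [keysOf, rKeys, reactTruthy]
    cases h : entryReaction v with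
    | none => simp; rfl
    | some r =>
      by_cases hr : r = "" <;> simp [h, hr, bump] <;> rfl

lemma filterMap_eq_flatMap_rKeys (vs : List (List (String × String))) :
    vs.filterMap reactTruthy = vs.flatMap rKeys := by
  induction vs with
  | nil => rfl
  | cons v vs ih =>
    simp only [List.filterMap_cons, List.flatMap_cons, rKeys]
    cases reactTruthy v <;> simp [ih]

lemma count_interleave (vs : List (List (String × String))) (k : String) :
    (vs.flatMap keysOf).count k
    = (vs.map entryStatus).count k + (vs.flatMap rKeys).count k := by
  induction vs with
  | nil => rfl
  | cons v vs ih =>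
    simp only [List.flatMap_cons, List.map_cons, List.count_append, List.count_cons, keysOf, ih]
    omega

lemma getD_merge (l : List (String × Int)) (c : PySem.Dict String Int) (k : String) :
    (l.foldl (fun c p => c.insert p.1 (c.getD p.1 0 + p.2)) c).getD k 0
    = c.getD k 0 + ((l.filter (fun p => p.1 == k)).map (·.2)).sum := by
  induction l generalizing c with
  | nil => simp
  | cons p l ih =>
    simp only [List.foldl_cons, List.filter_cons, ih]
    have : c.insert p.1 (c.getD p.1 0 + p.2) = c.modify p.1 0 (· + p.2) := rfl
    rw [this]
    by_cases hk : p.1 = k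
    · subst hk
      simp [PySem.Dict.getD_modify_self]
      ring
    · rw [PySem.Dict.getD_modify_of_ne]
      · simp [hk]
      · exact Ne.symm hk

lemma filter_map_nodup (L : List String) (g : String → Int) (k : String) (h : L.Nodup) :
    ((L.map (fun k' => (k', g k'))).filter (fun p => p.1 == k)).map (·.2)
    = if k ∈ L then [g k] else [] := by
  induction L with
  | nil => simp
  | cons x L ih =>
    simp only [List.map_cons, List.filter_cons] at *
    have hnd := (List.nodup_cons.mp h)
    by_cases hx : x = k
    · subst hx
      have : ∀ p ∈ L.map (fun k' => (k', g k')), ¬ (p.1 == x) = true := by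
        intro p hp
        simp only [List.mem_map] at hp
        obtain ⟨k', hk', rfl⟩ := hp
        simp only [beq_iff_eq]
        intro hc; exact hnd.1 (hc ▸ hk')
      simp [List.filter_eq_nil_iff.mpr this]
    · have hb : ((x, g x).1 == k) = false := by simp [hx]
      have hne : ¬ k = x := fun e => hx e.symm
      simp [hb, ih hnd.2, hne]

lemma getD_merge_counter (xs : List String) (c : PySem.Dict String Int) (k : String) :
    ((PySem.Dict.counter xs).items.foldl (fun c p => c.insert p.1 (c.getD p.1 0 + p.2)) c).getD k 0
    = c.getD k 0 + xs.count k := by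
  rw [getD_merge, PySem.Dict.items_counter, filter_map_nodup _ _ _ (PySem.Set.nodup_ofList xs)]
  by_cases hk : k ∈ PySem.Set.ofList xs
  · simp [hk]
  · have : xs.count k = 0 := by
      rw [List.count_eq_zero]
      intro hc; exact hk ((PySem.Set.mem_ofList xs k).mpr hc)
    simp [hk, this]

lemma keys_merge (t : PySem.Dict String Int) (c : PySem.Dict String Int) :
    (t.items.foldl (fun c p => c.insert p.1 (c.getD p.1 0 + p.2)) c).keys
    = PySem.Set.update c.keys (t.items.map (·.1)) := by
  exact PySem.Dict.keys_foldl_insert_key _ _ _ _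

lemma update_of_all_mem (s : PySem.Set String) (xs : List String) (h : ∀ x ∈ xs, x ∈ s) :
    PySem.Set.update s xs = s := by
  induction xs generalizing s with
  | nil => rfl
  | cons x xs ih =>
    rw [PySem.Set.update_cons, PySem.Set.add_of_mem (h x (by simp))]
    exact ih s (fun y hy => h y (by simp [hy]))

lemma update_ofList (s : PySem.Set String) (xs : List String) :
    PySem.Set.update s (PySem.Set.ofList xs) = PySem.Set.update s xs := by
  rw [PySem.Set.update_eq_append_filter, PySem.Set.update_eq_append_filter, PySem.Set.ofList_ofList]


-- (8) statuses already present: the interleaved key list updates keys like the reactions alone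
lemma update_interleave (vs : List (List (String × String))) (s : PySem.Set String)
    (h : ∀ v ∈ vs, entryStatus v ∈ s) :
    PySem.Set.update s (vs.flatMap keysOf) = PySem.Set.update s (vs.flatMap rKeys) := by
  induction vs generalizing s with
  | nil => rfl
  | cons v vs ih =>
    simp only [List.flatMap_cons, PySem.Set.update_append, keysOf, PySem.Set.update_cons,
      PySem.Set.add_of_mem (h v (by simp))]
    exact ih _ (fun w hw => (PySem.Set.mem_update _ _ _).mpr (Or.inl (h w (by simp [hw]))))

lemma initCounts_keys : initCounts.keys = ["open", "closed", "applied", "interested", "rejected"] := by decide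

-- the two final dicts agree
lemma dicts_eq (vs : List (List (String × String)))
    (hpre : ∀ v ∈ vs, entryStatus v ∈ (["open", "closed", "applied", "interested", "rejected"] : List String)) :
    (vs.flatMap keysOf).foldl bump initCounts
    = (PySem.Dict.counter (vs.filterMap reactTruthy)).items.foldl
        (fun c p => c.insert p.1 (c.getD p.1 0 + p.2))
        ((PySem.Dict.counter (vs.map entryStatus)).items.foldl
          (fun c p => c.insert p.1 (c.getD p.1 0 + p.2)) initCounts) := by
  have hpre' : ∀ v ∈ vs, entryStatus v ∈ initCounts.keys := by
    intro v hv; rw [initCounts_keys]; exact hpre v hv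
  set dA := (vs.flatMap keysOf).foldl bump initCounts with hdA
  set dB := (PySem.Dict.counter (vs.filterMap reactTruthy)).items.foldl
        (fun c p => c.insert p.1 (c.getD p.1 0 + p.2))
        ((PySem.Dict.counter (vs.map entryStatus)).items.foldl
          (fun c p => c.insert p.1 (c.getD p.1 0 + p.2)) initCounts) with hdB
  have hkA : dA.keys = PySem.Set.update initCounts.keys (vs.flatMap rKeys) := by
    rw [hdA]; unfold bump
    rw [PySem.Dict.keys_foldl_modify]
    exact update_interleave vs _ hpre'
  have hkB : dB.keys = PySem.Set.update initCounts.keys (vs.flatMap rKeys) := by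
    rw [hdB, keys_merge, keys_merge]
    have h1 : ((PySem.Dict.counter (vs.map entryStatus)).items.map (·.1))
        = PySem.Dict.keys (PySem.Dict.counter (vs.map entryStatus)) := rfl
    have h2 : ((PySem.Dict.counter (vs.filterMap reactTruthy)).items.map (·.1))
        = PySem.Dict.keys (PySem.Dict.counter (vs.filterMap reactTruthy)) := rfl
    rw [h1, h2, PySem.Dict.keys_counter, PySem.Dict.keys_counter, update_ofList, update_ofList,
      update_of_all_mem initCounts.keys (vs.map entryStatus) (by
        intro x hx
        obtain ⟨v, hv, rfl⟩ := List.mem_map.mp hx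
        exact hpre' v hv),
      filterMap_eq_flatMap_rKeys]
  have hndA : dA.keys.Nodup := by
    rw [hkA]; exact PySem.Set.nodup_update _ _ (by rw [initCounts_keys]; decide)
  have hndB : dB.keys.Nodup := by
    rw [hkB]; exact PySem.Set.nodup_update _ _ (by rw [initCounts_keys]; decide)
  have hget : ∀ k, dA.getD k 0 = dB.getD k 0 := by
    intro k
    have hA : dA.getD k 0 = initCounts.getD k 0 + (vs.flatMap keysOf).count k := by
      rw [hdA]; unfold bump; exact PySem.Dict.getD_foldl_modify_add_one _ _ _
    have hB : dB.getD k 0 = initCounts.getD k 0 + (vs.map entryStatus).count k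
        + (vs.filterMap reactTruthy).count k := by
      rw [hdB, getD_merge_counter, getD_merge_counter]
    rw [hA, hB, count_interleave, filterMap_eq_flatMap_rKeys]
    push_cast
    ring
  apply PySem.Dict.ext
  rw [PySem.Dict.items_eq_map_keys dA hndA 0, PySem.Dict.items_eq_map_keys dB hndB 0, hkA, ← hkB]
  exact List.map_congr_left (fun k _ => by rw [hget k])

-- ===== VERDICT (by name: the statement is the Claim_ definition above) =====
theorem pool_summary_spec : Claim_equal_pool_summary := by
  intro pool _ hpre
  show pool_summary pool = pool_summary_alt pool
  unfold pool_summary pool_summary_alt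
  dsimp only []
  rw [A_foldl]
  have hc0 : (["open", "closed", "applied", "interested", "rejected"] : List String).foldl
      (fun d k => d.insert k (0 : Int)) PySem.Dict.empty = initCounts := by decide
  have ht : ∀ ks : List String, tally ks = PySem.Dict.counter ks := fun ks => rfl
  rw [hc0, ht, ht, dicts_eq _ hpre]
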